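-- pv_equiv track=rewrite | github.com/jagilley/zipfian-grokking | interaction_as_supervision/train_learned_policy.py | get_enabled_type_offsets
-- ===== SOURCE A (Python) =====
-- from typing import Tuple, Dict, Any, Optional
--
-- def get_enabled_type_offsets(
--     enabled_transforms: list,
--     n_translation: int,
--     n_scaling: int,
--     n_quadratic: int,
--     n_random: int,
-- ) -> Dict[int, int]:
--     """
--     Get the starting offset for each enabled transform type in the
--     contiguous enabled action space.
--
--     Returns:
--         Dict mapping transform_type -> offset in enabled action space
--     """
--     type_sizes = [n_translation, n_scaling, n_quadratic, n_random]
--     offsets = {}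
--     current_offset = 0
--     for t in sorted(enabled_transforms):
--         offsets[t] = current_offset
--         current_offset += type_sizes[t]
--     return offsets
-- ===== SOURCE B (Python) =====
-- def get_enabled_type_offsets(
--     enabled_transforms: list,
--     n_translation: int,
--     n_scaling: int,
--     n_quadratic: int,
--     n_random: int,
-- ):
--     """Selection loop: repeatedly extract the minimum remaining enabled id,
--     assign it the accumulated offset, and remove it -- no sort."""
--     type_sizes = [n_translation, n_scaling, n_quadratic, n_random]
--     offsets = {}
--     remaining = list(enabled_transforms)
--     acc = 0
--     while remaining:
--         m = min(remaining)
--         offsets[m] = acc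
--         acc += type_sizes[m]
--         remaining.remove(m)
--     return offsets
-- ===== Notes on version B (the rewrite author's own statement) =====
-- stated objective: alternative
-- what changed: Replaced sort-then-prefix-sum over the sorted ids with a selection loop that repeatedly extracts and removes the minimum remaining id, assigning it the running offset.
import Mathlib
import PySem

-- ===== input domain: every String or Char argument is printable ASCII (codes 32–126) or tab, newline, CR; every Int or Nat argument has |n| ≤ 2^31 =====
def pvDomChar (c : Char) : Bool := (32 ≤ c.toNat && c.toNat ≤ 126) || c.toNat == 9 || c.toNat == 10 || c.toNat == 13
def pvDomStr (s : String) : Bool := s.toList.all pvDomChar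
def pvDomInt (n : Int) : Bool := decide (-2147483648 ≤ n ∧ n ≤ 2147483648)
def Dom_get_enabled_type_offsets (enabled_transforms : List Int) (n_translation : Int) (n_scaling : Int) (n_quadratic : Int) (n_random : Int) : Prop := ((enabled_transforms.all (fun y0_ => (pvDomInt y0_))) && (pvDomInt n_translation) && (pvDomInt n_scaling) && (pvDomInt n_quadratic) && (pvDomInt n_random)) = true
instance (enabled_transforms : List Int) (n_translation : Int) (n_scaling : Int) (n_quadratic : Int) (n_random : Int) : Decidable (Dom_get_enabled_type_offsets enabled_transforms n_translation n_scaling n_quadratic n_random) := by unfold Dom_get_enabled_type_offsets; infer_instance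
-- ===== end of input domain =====

-- B replaces A's sort-then-prefix-sum pass with a selection loop (repeatedly extract and
-- remove the minimum remaining id); alternative decomposition, not faster.

-- ===== PORT A =====
-- Literal port of A: sort, then one pass keeping (dict, current_offset).
-- type_sizes[t] is PySem.List.pyGetD with default 0; Pre_ keeps t in -4..3, where Python's
-- indexing (negative = from the end) returns a value, so the default is never used.
def get_enabled_type_offsets (enabled_transforms : List Int) (n_translation : Int) (n_scaling : Int) (n_quadratic : Int) (n_random : Int) : List (Int × Int) :=
  let type_sizes : List Int := [n_translation, n_scaling, n_quadratic, n_random]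
  ((PySem.List.sorted enabled_transforms (fun t => t) false).foldl
      (fun (st : PySem.Dict Int Int × Int) t =>
        (st.1.insert t st.2, st.2 + PySem.List.pyGetD type_sizes t 0))
      (PySem.Dict.empty, 0)).1.items

-- ===== PORT B =====
-- Port of Source B's while-loop: min(remaining) → PySem.List.min?, remaining.remove(m) →
-- PySem.List.remove?. Its none branch is unreachable (the minimum is a member, so
-- Python's remove never raises there).
theorem pv_remove_len {xs : List Int} {v : Int} {r : List Int}
    (h : PySem.List.remove? xs v = some r) : r.length < xs.length := by
  have hv : v ∈ xs := by
    by_contra hvn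
    rw [(PySem.List.remove?_eq_none_iff xs v).mpr hvn] at h
    simp at h
  rw [PySem.List.remove?_eq_some_erase xs v hv] at h
  cases h
  have := List.length_erase_of_mem hv
  have : 0 < xs.length := List.length_pos_of_mem hv
  omega

def pvSelLoop (f : Int → Int) (remaining : List Int) (d : PySem.Dict Int Int) (acc : Int) :
    PySem.Dict Int Int :=
  match PySem.List.min? remaining (fun x => x) with
  | none => d
  | some m =>
    match h2 : PySem.List.remove? remaining m with
    | none => d
    | some rest => pvSelLoop f rest (d.insert m acc) (acc + f m)
termination_by remaining.length
decreasing_by exact pv_remove_len h2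

def get_enabled_type_offsets_alt (enabled_transforms : List Int) (n_translation : Int) (n_scaling : Int) (n_quadratic : Int) (n_random : Int) : List (Int × Int) :=
  let type_sizes : List Int := [n_translation, n_scaling, n_quadratic, n_random]
  (pvSelLoop (fun t => PySem.List.pyGetD type_sizes t 0) enabled_transforms PySem.Dict.empty 0).items

-- ===== PRECONDITION & SPEC =====
-- Pre_ excludes only ids outside -4..3, on which A raises IndexError (type_sizes[t]).
def Pre_get_enabled_type_offsets (enabled_transforms : List Int) (n_translation : Int) (n_scaling : Int) (n_quadratic : Int) (n_random : Int) : Prop :=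
  ∀ t ∈ enabled_transforms, -4 ≤ t ∧ t < 4
instance (enabled_transforms : List Int) (n_translation : Int) (n_scaling : Int) (n_quadratic : Int) (n_random : Int) : Decidable (Pre_get_enabled_type_offsets enabled_transforms n_translation n_scaling n_quadratic n_random) := by unfold Pre_get_enabled_type_offsets; infer_instance
def pvWitness_get_enabled_type_offsets : List Int × Int × Int × Int × Int := ([2, 0, 3, 0], 1, 2, 3, 4)

def Spec_get_enabled_type_offsets (enabled_transforms : List Int) (n_translation : Int) (n_scaling : Int) (n_quadratic : Int) (n_random : Int) (out : List (Int × Int)) : Prop := out = get_enabled_type_offsets_alt enabled_transforms n_translation n_scaling n_quadratic n_random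
instance (enabled_transforms : List Int) (n_translation : Int) (n_scaling : Int) (n_quadratic : Int) (n_random : Int) (out : List (Int × Int)) : Decidable (Spec_get_enabled_type_offsets enabled_transforms n_translation n_scaling n_quadratic n_random out) := by unfold Spec_get_enabled_type_offsets; infer_instance

-- ===== CLAIM (what is proved, stated in full; the proofs are below) =====
def Claim_equal_get_enabled_type_offsets : Prop := ∀ (enabled_transforms : List Int) (n_translation : Int) (n_scaling : Int) (n_quadratic : Int) (n_random : Int), Dom_get_enabled_type_offsets enabled_transforms n_translation n_scaling n_quadratic n_random → Pre_get_enabled_type_offsets enabled_transforms n_translation n_scaling n_quadratic n_random → Spec_get_enabled_type_offsets enabled_transforms n_translation n_scaling n_quadratic n_random (get_enabled_type_offsets enabled_transforms n_translation n_scaling n_quadratic n_random)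

-- ===== LEMMAS AND PROOFS =====

-- Extracting the first minimum and sorting the rest IS the sorted order.
theorem pv_sorted_cons_min {xs : List Int} {m : Int}
    (h : PySem.List.min? xs (fun x => x) = some m) :
    PySem.List.sorted xs (fun t => t) false = m :: PySem.List.sorted (xs.erase m) (fun t => t) false := by
  have hm : m ∈ xs := PySem.List.min?_mem h
  have hmin : ∀ y ∈ xs, m ≤ y := PySem.List.min?_isMin h
  apply PySem.List.sorted_id_eq_of_perm_of_pairwise
  · exact ((PySem.List.sorted_perm (xs.erase m) _ false).cons m).trans
      (List.perm_cons_erase hm).symm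
  · rw [List.pairwise_cons]
    refine ⟨fun y hy => ?_, PySem.List.sorted_pairwise (xs.erase m) (fun t => t)⟩
    exact hmin y (List.mem_of_mem_erase ((PySem.List.mem_sorted (xs.erase m) (fun t => t) false y).mp hy))

-- The selection loop performs exactly A's fold over the sorted list.
theorem pv_sel_eq_fold (f : Int → Int) :
    ∀ (xs : List Int) (d : PySem.Dict Int Int) (acc : Int),
      pvSelLoop f xs d acc
        = ((PySem.List.sorted xs (fun t => t) false).foldl
            (fun (st : PySem.Dict Int Int × Int) t => (st.1.insert t st.2, st.2 + f t))
            (d, acc)).1 := by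
  intro xs
  induction hn : xs.length using Nat.strong_induction_on generalizing xs with
  | _ n ih =>
    intro d acc
    rw [pvSelLoop]
    cases hmin : PySem.List.min? xs (fun x => x) with
    | none =>
      have hnil : xs = [] := (PySem.List.min?_eq_none_iff xs (fun x => x)).mp hmin
      simp [hnil, PySem.List.sorted]
    | some m =>
      have hm : m ∈ xs := PySem.List.min?_mem hmin
      have hrem : PySem.List.remove? xs m = some (xs.erase m) :=
        PySem.List.remove?_eq_some_erase xs m hm
      have hlen : (xs.erase m).length < n := by
        have := List.length_erase_of_mem hm
        have : 0 < xs.length := List.length_pos_of_mem hm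
        omega
      split
      · rename_i h2
        simp at h2
      · rename_i rest h2
        injection h2 with h3
        subst h3
        split
        · rename_i h4
          rw [hrem] at h4
          simp at h4
        · rename_i rest2 h4
          rw [hrem] at h4
          injection h4 with h5
          subst h5
          rw [ih _ hlen _ rfl, pv_sorted_cons_min hmin]
          simp

-- ===== VERDICT (by name: the statement is the Claim_ definition above) =====
theorem get_enabled_type_offsets_spec : Claim_equal_get_enabled_type_offsets := by
  intro xs n1 n2 n3 n4 _ _
  unfold Spec_get_enabled_type_offsets get_enabled_type_offsets get_enabled_type_offsets_alt
  simp only [pv_sel_eq_fold]
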